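-- pv_equiv track=rewrite | github.com/WouterWV/AOC23 | q11/q11.py | distance2
-- ===== SOURCE A (Python) =====
-- def distance(i, j, k, l):
--     return abs(k-i) + abs(j-l)
--
-- def distance2(i, j, k, l, rowins, colins, Nexp):
--     dist = distance(i, j, k, l)
--     for r in rowins:
--         if i<=r<=k or k<=r<=i:
--             dist+=Nexp
--     for c in colins:
--         if j<=c<=l or l<=c<=j:
--             dist+=Nexp
--     return dist
-- ===== SOURCE B (Python) =====
-- def _count_below(s, x, inclusive):
--     # number of elements of sorted list s that are < x (or <= x when inclusive)
--     lo, hi = 0, len(s)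
--     while lo < hi:
--         mid = (lo + hi) // 2
--         if s[mid] < x or (inclusive and s[mid] == x):
--             lo = mid + 1
--         else:
--             hi = mid
--     return lo
--
-- def distance2(i, j, k, l, rowins, colins, Nexp):
--     r0, r1 = (i, k) if i <= k else (k, i)
--     c0, c1 = (j, l) if j <= l else (l, j)
--     sr = sorted(rowins)
--     sc = sorted(colins)
--     nr = _count_below(sr, r1, True) - _count_below(sr, r0, False)
--     nc = _count_below(sc, c1, True) - _count_below(sc, c0, False)
--     return (r1 - r0) + (c1 - c0) + Nexp * (nr + nc)
-- ===== Notes on version B (the rewrite author's own statement) =====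
-- stated objective: alternative
-- what changed: B replaces A's two per-element accumulation loops by ordering the segment endpoints, sorting each insertion list once and counting the entries inside the crossed interval with a hand-written binary search, then adding Nexp times the total count.
import Mathlib
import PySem

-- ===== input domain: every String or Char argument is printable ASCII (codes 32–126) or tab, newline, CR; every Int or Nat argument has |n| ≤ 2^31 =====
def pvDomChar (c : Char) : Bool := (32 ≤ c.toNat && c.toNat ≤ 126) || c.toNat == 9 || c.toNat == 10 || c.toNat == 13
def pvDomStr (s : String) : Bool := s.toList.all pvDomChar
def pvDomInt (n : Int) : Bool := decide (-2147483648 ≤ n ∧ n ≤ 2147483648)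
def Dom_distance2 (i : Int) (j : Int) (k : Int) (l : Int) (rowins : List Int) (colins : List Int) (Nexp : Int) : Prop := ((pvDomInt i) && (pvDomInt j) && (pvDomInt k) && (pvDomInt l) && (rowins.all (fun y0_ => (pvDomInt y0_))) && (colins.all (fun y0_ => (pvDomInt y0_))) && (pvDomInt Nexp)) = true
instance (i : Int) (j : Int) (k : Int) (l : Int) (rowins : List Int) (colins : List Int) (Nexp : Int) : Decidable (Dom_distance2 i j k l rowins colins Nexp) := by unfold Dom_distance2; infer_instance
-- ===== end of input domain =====

-- B replaces A's two linear scans by sorting each insertion list once and counting the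
-- entries inside the crossed interval with a hand-written binary search (alternative algorithm).

-- ===== PORT A =====
def pvDistance (i : Int) (j : Int) (k : Int) (l : Int) : Int := |k - i| + |j - l|

def distance2 (i : Int) (j : Int) (k : Int) (l : Int) (rowins : List Int) (colins : List Int) (Nexp : Int) : Int :=
  let dist := pvDistance i j k l
  let dist := rowins.foldl (fun d r => if (i ≤ r ∧ r ≤ k) ∨ (k ≤ r ∧ r ≤ i) then d + Nexp else d) dist
  colins.foldl (fun d c => if (j ≤ c ∧ c ≤ l) ∨ (l ≤ c ∧ c ≤ j) then d + Nexp else d) dist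

-- ===== PORT B =====
-- _count_below(s, x, inclusive): binary search on the sorted list s (while lo < hi).
-- s[mid] is always in range when called as in B; the `none` arm is only a totality guard.
def pvCountBelow (s : List Int) (x : Int) (inclusive : Bool) (lo hi : Nat) : Nat :=
  if _h : lo < hi then
    match s[(lo + hi) / 2]? with
    | some y =>
        if y < x ∨ (inclusive = true ∧ y = x) then pvCountBelow s x inclusive ((lo + hi) / 2 + 1) hi
        else pvCountBelow s x inclusive lo ((lo + hi) / 2)
    | none => lo
  else lo
termination_by hi - lo
decreasing_by all_goals omega

def distance2_alt (i : Int) (j : Int) (k : Int) (l : Int) (rowins : List Int) (colins : List Int) (Nexp : Int) : Int :=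
  let r0 := if i ≤ k then i else k
  let r1 := if i ≤ k then k else i
  let c0 := if j ≤ l then j else l
  let c1 := if j ≤ l then l else j
  let sr := PySem.List.sorted rowins (fun x => x) false
  let sc := PySem.List.sorted colins (fun x => x) false
  let nr : Int := (pvCountBelow sr r1 true 0 sr.length : Int) - (pvCountBelow sr r0 false 0 sr.length : Int)
  let nc : Int := (pvCountBelow sc c1 true 0 sc.length : Int) - (pvCountBelow sc c0 false 0 sc.length : Int)
  (r1 - r0) + (c1 - c0) + Nexp * (nr + nc)

-- ===== PRECONDITION & SPEC =====
def Spec_distance2 (i : Int) (j : Int) (k : Int) (l : Int) (rowins : List Int) (colins : List Int) (Nexp : Int) (out : Int) : Prop := out = distance2_alt i j k l rowins colins Nexp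
instance (i : Int) (j : Int) (k : Int) (l : Int) (rowins : List Int) (colins : List Int) (Nexp : Int) (out : Int) : Decidable (Spec_distance2 i j k l rowins colins Nexp out) := by unfold Spec_distance2; infer_instance

-- ===== CLAIM (what is proved, stated in full; the proofs are below) =====
def Claim_equal_distance2 : Prop := ∀ (i : Int) (j : Int) (k : Int) (l : Int) (rowins : List Int) (colins : List Int) (Nexp : Int), Dom_distance2 i j k l rowins colins Nexp → Spec_distance2 i j k l rowins colins Nexp (distance2 i j k l rowins colins Nexp)

-- ===== LEMMAS AND PROOFS =====

-- A's accumulation loop adds Nexp once per matching element: it is dist + Nexp * countP.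
theorem pv_foldl_count (P : Int → Prop) [DecidablePred P] (Nexp : Int) :
    ∀ (s : List Int) (d : Int),
      s.foldl (fun d r => if P r then d + Nexp else d) d
        = d + Nexp * (s.countP fun r => decide (P r)) := by
  intro s
  induction s with
  | nil => intro d; simp
  | cons a t ih =>
      intro d
      by_cases h : P a <;> simp [h, ih] <;> ring

-- If a predicate holds exactly on the first b indices of s, its count over s is b.
theorem pv_countP_of_boundary (s : List Int) (p : Int → Bool) (b : Nat) (hb : b ≤ s.length)
    (hlow : ∀ (idx : Nat) (h : idx < s.length), idx < b → p s[idx] = true)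
    (hhigh : ∀ (idx : Nat) (h : idx < s.length), b ≤ idx → p s[idx] = false) :
    s.countP p = b := by
  have hsplit : s.countP p = (s.take b).countP p + (s.drop b).countP p := by
    rw [← List.countP_append, List.take_append_drop]
  have h1 : (s.take b).countP p = (s.take b).length := by
    rw [List.countP_eq_length]
    intro a ha
    obtain ⟨idx, hidx, rfl⟩ := List.getElem_of_mem ha
    rw [List.getElem_take]
    exact hlow idx (by simp at hidx; omega) (by simp at hidx; omega)
  have h2 : (s.drop b).countP p = 0 := by
    rw [List.countP_eq_zero]
    intro a ha
    obtain ⟨idx, hidx, rfl⟩ := List.getElem_of_mem ha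
    rw [List.getElem_drop]
    simp only [List.length_drop] at hidx
    simp [hhigh (b + idx) (by omega) (by omega)]
  rw [hsplit, h1, h2, List.length_take]
  omega

-- Invariant of the binary search: with all indices below lo satisfying p and all indices
-- from hi on refuting it, it returns the total count of p over the (monotone) list s.
theorem pv_countBelow_go (s : List Int) (x : Int) (inc : Bool)
    (hmono : ∀ (a b : Nat) (_ : a ≤ b) (hb : b < s.length), s[a] ≤ s[b]) :
    ∀ (n lo hi : Nat), hi - lo ≤ n → lo ≤ hi → hi ≤ s.length →
      (∀ (idx : Nat) (h : idx < s.length), idx < lo →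
        (decide (s[idx] < x ∨ (inc = true ∧ s[idx] = x))) = true) →
      (∀ (idx : Nat) (h : idx < s.length), hi ≤ idx →
        (decide (s[idx] < x ∨ (inc = true ∧ s[idx] = x))) = false) →
      pvCountBelow s x inc lo hi = s.countP (fun v => decide (v < x ∨ (inc = true ∧ v = x))) := by
  intro n
  induction n with
  | zero =>
      intro lo hi hn hle hlen hlow hhigh
      have : lo = hi := by omega
      subst this
      rw [pvCountBelow]
      simp only [lt_irrefl, dite_false]
      exact (pv_countP_of_boundary s _ lo hlen hlow
        (fun idx h hge => hhigh idx h hge)).symm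
  | succ n ih =>
      intro lo hi hn hle hlen hlow hhigh
      rw [pvCountBelow]
      by_cases hlt : lo < hi
      · simp only [hlt, dite_true]
        have hmid : (lo + hi) / 2 < s.length := by omega
        rw [List.getElem?_eq_getElem hmid]
        have hmiddef : (lo + hi) / 2 = (lo + hi) / 2 := rfl
        generalize hmid2 : (lo + hi) / 2 = mid at *
        dsimp only
        by_cases hcond : s[mid] < x ∨ (inc = true ∧ s[mid] = x)
        · rw [if_pos hcond]
          apply ih (mid + 1) hi (by omega) (by omega) hlen
          · intro idx h hidx
            by_cases hio : idx < lo
            · exact hlow idx h hio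
            · have hle2 : s[idx] ≤ s[mid] := hmono idx mid (by omega) hmid
              rcases hcond with hlt2 | ⟨hi2, he2⟩
              · simp only [decide_eq_true_eq]; left; omega
              · simp only [decide_eq_true_eq]
                rcases lt_or_eq_of_le (he2 ▸ hle2) with h' | h'
                · left; exact h'
                · right; exact ⟨hi2, h'⟩
          · exact hhigh
        · rw [if_neg hcond]
          apply ih lo mid (by omega) (by omega) (by omega) hlow
          · intro idx h hidx
            have hle2 : s[mid] ≤ s[idx] := hmono mid idx hidx h
            simp only [decide_eq_false_iff_not, not_or, not_and]
            push_neg at hcond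
            obtain ⟨h1, h2⟩ := hcond
            constructor
            · by_cases hi2 : inc = true
              · have := h2 hi2; omega
              · omega
            · intro hi2
              have := h2 hi2; omega
      · simp only [hlt, dite_false]
        have : lo = hi := by omega
        subst this
        exact (pv_countP_of_boundary s _ lo hlen hlow
          (fun idx h hge => hhigh idx h hge)).symm

theorem pv_countBelow_eq (s : List Int) (x : Int) (inc : Bool)
    (hmono : ∀ (a b : Nat) (_ : a ≤ b) (hb : b < s.length), s[a] ≤ s[b]) :
    pvCountBelow s x inc 0 s.length
      = s.countP (fun v => decide (v < x ∨ (inc = true ∧ v = x))) := by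
  exact pv_countBelow_go s x inc hmono s.length 0 s.length (by omega) (by omega) (by omega)
    (fun idx h hidx => by omega) (fun idx h hidx => by omega)

-- counts below b (inclusive) split into counts below a (strict) plus the interval [a, b].
theorem pv_countP_split (s : List Int) (a b : Int) (hab : a ≤ b) :
    s.countP (fun v => decide (v ≤ b))
      = s.countP (fun v => decide (v < a)) + s.countP (fun v => decide (a ≤ v ∧ v ≤ b)) := by
  induction s with
  | nil => simp
  | cons h t ih =>
      simp only [List.countP_cons, ih, decide_eq_true_eq]
      by_cases h1 : h ≤ b <;> by_cases h2 : h < a <;> by_cases h3 : a ≤ h <;>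
        simp only [h1, h2, h3, and_true, true_and, and_false, false_and, and_self,
          decide_true, decide_false, if_true, if_false] <;> omega

-- the interval count over the sorted copy equals the interval count over the original list
theorem pv_count_interval (xs : List Int) (a b : Int) (hab : a ≤ b) :
    ((pvCountBelow (PySem.List.sorted xs (fun x => x) false) b true 0
        (PySem.List.sorted xs (fun x => x) false).length : Int)
      - (pvCountBelow (PySem.List.sorted xs (fun x => x) false) a false 0
        (PySem.List.sorted xs (fun x => x) false).length : Int))
      = (xs.countP (fun v => decide (a ≤ v ∧ v ≤ b)) : Int) := by
  set s := PySem.List.sorted xs (fun x => x) false with hs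
  have hmono : ∀ (p q : Nat) (_ : p ≤ q) (hq : q < s.length), s[p] ≤ s[q] := by
    intro p q hpq hq
    exact PySem.List.sorted_id_getElem_mono xs hpq hq
  rw [pv_countBelow_eq s b true hmono, pv_countBelow_eq s a false hmono]
  rw [List.countP_congr (l := s)
        (p := fun v => decide (v < b ∨ (true = true ∧ v = b)))
        (q := fun v => decide (v ≤ b))
        (fun v _ => by simp only [decide_eq_true_eq, eq_self_iff_true, true_and]; omega),
      List.countP_congr (l := s)
        (p := fun v => decide (v < a ∨ (false = true ∧ v = a)))
        (q := fun v => decide (v < a))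
        (fun v _ => by simp only [decide_eq_true_eq, Bool.false_eq_true, false_and, or_false])]
  have hperm : s.Perm xs := PySem.List.sorted_perm xs (fun x => x) false
  rw [hperm.countP_eq, hperm.countP_eq, pv_countP_split xs a b hab]
  push_cast
  ring

-- ===== VERDICT (by name: the statement is the Claim_ definition above) =====
theorem distance2_spec : Claim_equal_distance2 := by
  intro i j k l rowins colins Nexp _
  simp only [Spec_distance2, distance2, distance2_alt, pvDistance]
  rw [pv_foldl_count (fun r => (i ≤ r ∧ r ≤ k) ∨ (k ≤ r ∧ r ≤ i)) Nexp,
      pv_foldl_count (fun c => (j ≤ c ∧ c ≤ l) ∨ (l ≤ c ∧ c ≤ j)) Nexp]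
  rw [List.countP_congr (l := rowins)
        (p := fun r => decide ((i ≤ r ∧ r ≤ k) ∨ (k ≤ r ∧ r ≤ i)))
        (q := fun v => decide (min i k ≤ v ∧ v ≤ max i k))
        (fun v _ => by simp only [decide_eq_true_eq]; omega),
      List.countP_congr (l := colins)
        (p := fun c => decide ((j ≤ c ∧ c ≤ l) ∨ (l ≤ c ∧ c ≤ j)))
        (q := fun v => decide (min j l ≤ v ∧ v ≤ max j l))
        (fun v _ => by simp only [decide_eq_true_eq]; omega)]
  by_cases hik : i ≤ k <;> by_cases hjl : j ≤ l
  · simp only [min_def, max_def, hik, hjl, if_pos]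
    rw [pv_count_interval rowins i k hik, pv_count_interval colins j l hjl,
        abs_of_nonneg (by omega : (0:Int) ≤ k - i), abs_of_nonpos (by omega : j - l ≤ (0:Int))]
    ring
  · simp only [min_def, max_def, hik, hjl, if_false, if_pos]
    rw [pv_count_interval rowins i k hik, pv_count_interval colins l j (by omega),
        abs_of_nonneg (by omega : (0:Int) ≤ k - i), abs_of_nonneg (by omega : (0:Int) ≤ j - l)]
    ring
  · simp only [min_def, max_def, hik, hjl, if_false, if_pos]
    rw [pv_count_interval rowins k i (by omega), pv_count_interval colins j l hjl,
        abs_of_nonpos (by omega : k - i ≤ (0:Int)), abs_of_nonpos (by omega : j - l ≤ (0:Int))]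
    ring
  · simp only [min_def, max_def, hik, hjl, if_false]
    rw [pv_count_interval rowins k i (by omega), pv_count_interval colins l j (by omega),
        abs_of_nonpos (by omega : k - i ≤ (0:Int)), abs_of_nonneg (by omega : (0:Int) ≤ j - l)]
    ring
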